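-- pv_equiv track=rewrite | github.com/edoardo1710/-ProgrammingLab | Primo semestre/Lezione_3/Esercizio_4.py | conteggio
-- ===== SOURCE A (Python) =====
-- def conteggio(sentences):
--     words = {}
--     for sentence in sentences:
--         parole = sentence.split(' ')
--         if parole[0] not in words.keys():
--             words[parole[0]] = 1
--         elif parole[0] in words.keys():
--             words[parole[0]] +=1
--     return words
-- ===== SOURCE B (Python) =====
-- def conteggio(sentences):
--     firsts = [s.split(' ')[0] for s in sentences]
--     return {w: firsts.count(w) for w in dict.fromkeys(firsts)}
-- ===== Notes on version B (the rewrite author's own statement) =====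
-- stated objective: alternative
-- what changed: Replaces A's single accumulating dict-update loop with a two-phase collect-then-rescan strategy: first extract the list of first words, then build the result with a dict comprehension over the ordered-deduplicated first words using list.count.
import Mathlib
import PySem

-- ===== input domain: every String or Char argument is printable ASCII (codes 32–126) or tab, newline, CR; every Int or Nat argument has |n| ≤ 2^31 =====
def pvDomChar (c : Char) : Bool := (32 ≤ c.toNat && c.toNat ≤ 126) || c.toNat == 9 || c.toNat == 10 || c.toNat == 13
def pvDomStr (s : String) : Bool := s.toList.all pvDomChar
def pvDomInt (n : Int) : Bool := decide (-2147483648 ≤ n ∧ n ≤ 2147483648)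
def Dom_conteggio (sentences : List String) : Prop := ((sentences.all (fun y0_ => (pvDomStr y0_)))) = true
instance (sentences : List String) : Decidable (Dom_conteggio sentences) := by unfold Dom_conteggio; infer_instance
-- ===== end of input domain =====

-- B replaces A's single accumulating dict-update loop with a two-phase collect-then-rescan
-- strategy (list of first words, then a dict comprehension counting with list.count): alternative decomposition, not faster.

-- parole[0]: s.split(' ') always returns a nonempty list (sep ≠ ''), so parole[0] is its head; exact.
def pvFirstWord (s : String) : String :=
  ((PySem.Str.split? s " ").getD []).headD ""

-- ===== PORT A =====
def conteggio (sentences : List String) : List (String × Int) :=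
  (sentences.foldl (fun words sentence =>
      let k := pvFirstWord sentence
      if words.contains k = false then words.insert k 1
      else if words.contains k = true then words.insert k (words.getD k 0 + 1)
      else words)
    (PySem.Dict.empty : PySem.Dict String Int)).items

-- ===== PORT B =====
def conteggio_alt (sentences : List String) : List (String × Int) :=
  let firsts := sentences.map pvFirstWord
  (PySem.List.dedup firsts).map (fun w => (w, (firsts.count w : Int)))

-- ===== PRECONDITION & SPEC =====
def Spec_conteggio (sentences : List String) (out : List (String × Int)) : Prop := out = conteggio_alt sentences
instance (sentences : List String) (out : List (String × Int)) : Decidable (Spec_conteggio sentences out) := by unfold Spec_conteggio; infer_instance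

-- ===== CLAIM (what is proved, stated in full; the proofs are below) =====
def Claim_equal_conteggio : Prop := ∀ (sentences : List String), Dom_conteggio sentences → Spec_conteggio sentences (conteggio sentences)

-- ===== LEMMAS AND PROOFS =====

-- A's branch pair collapses to one uniform insert step.
theorem pvStep_eq (d : PySem.Dict String Int) (k : String) :
    (if d.contains k = false then d.insert k 1
     else if d.contains k = true then d.insert k (d.getD k 0 + 1)
     else d) = d.insert k (d.getD k 0 + 1) := by
  by_cases h : d.contains k = true
  · simp [h]
  · have h' : d.contains k = false := by simpa using h
    simp [h', PySem.Dict.getD_of_not_contains d (0:Int) h']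

-- ===== VERDICT (by name: the statement is the Claim_ definition above) =====
theorem conteggio_spec : Claim_equal_conteggio := by
  intro sentences _
  unfold Spec_conteggio conteggio conteggio_alt
  have hstep : (sentences.foldl (fun words sentence =>
      let k := pvFirstWord sentence
      if words.contains k = false then words.insert k 1
      else if words.contains k = true then words.insert k (words.getD k 0 + 1)
      else words) (PySem.Dict.empty : PySem.Dict String Int))
      = (sentences.map pvFirstWord).foldl
          (fun d x => d.insert x (d.getD x 0 + 1)) PySem.Dict.empty := by
    rw [List.foldl_map]
    exact PySem.List.foldl_congr_mem _ _ _ _ (fun d s _ => pvStep_eq d (pvFirstWord s))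
  rw [hstep, PySem.Dict.foldl_insert_getD_add_one_eq_counter,
      PySem.Dict.items_counter]
  simp [PySem.List.dedup_eq_ofList]
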